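-- pv_equiv track=rewrite | github.com/thehalleyyoung/halley-labs | marl-interaction-race-verifier/implementation/marace/evaluation/baselines.py | _enumerate_all_schedules
-- ===== SOURCE A (Python) =====
-- import itertools
--
-- def _enumerate_all_schedules(
--     groups: list[list[int]],
--     max_depth: int,
-- ) -> list[list[int]]:
--     """Enumerate without HB pruning (exponential)."""
--     all_agents = sorted({a for g in groups for a in g})
--     schedules: list[list[int]] = []
--     capped_depth = min(max_depth, 5)
--     for depth in range(1, capped_depth + 1):
--         for combo in itertools.product(all_agents, repeat=depth):
--             schedules.append(list(combo))
--             if len(schedules) >= 50_000: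
--                 return schedules
--     return schedules
-- ===== SOURCE B (Python) =====
-- def _enumerate_all_schedules(
--     groups: list[list[int]],
--     max_depth: int,
-- ) -> list[list[int]]:
--     """Enumerate without HB pruning, level by level (frontier of current-depth prefixes)."""
--     agents = sorted({a for g in groups for a in g})
--     out: list[list[int]] = []
--     frontier: list[list[int]] = [[]]
--     for _ in range(min(max_depth, 5)):
--         next_frontier: list[list[int]] = []
--         for prefix in frontier:
--             for a in agents:
--                 sched = prefix + [a]
--                 out.append(sched)
--                 if len(out) >= 50_000:
--                     return out
--                 next_frontier.append(sched)
--         frontier = next_frontier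
--     return out
-- ===== Notes on version B (the rewrite author's own statement) =====
-- stated objective: alternative
-- what changed: B builds each depth level by extending a maintained frontier of previous-depth schedules with one appended agent, instead of calling itertools.product afresh for every depth; emission order and the 50000 early-return cap are preserved.
import Mathlib
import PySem

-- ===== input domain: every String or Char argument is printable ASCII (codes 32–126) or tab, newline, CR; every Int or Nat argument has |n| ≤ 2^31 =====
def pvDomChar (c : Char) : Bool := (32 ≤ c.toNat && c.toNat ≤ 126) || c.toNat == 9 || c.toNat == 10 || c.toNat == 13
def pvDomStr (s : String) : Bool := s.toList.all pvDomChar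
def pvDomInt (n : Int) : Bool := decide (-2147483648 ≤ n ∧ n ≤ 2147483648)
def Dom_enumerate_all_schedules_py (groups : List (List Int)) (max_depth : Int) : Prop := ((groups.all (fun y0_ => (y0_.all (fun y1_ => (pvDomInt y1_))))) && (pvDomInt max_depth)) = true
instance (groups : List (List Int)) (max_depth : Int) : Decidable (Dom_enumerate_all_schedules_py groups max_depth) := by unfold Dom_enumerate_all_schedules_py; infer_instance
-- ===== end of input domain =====

-- B re-implements the enumeration level by level from a frontier of previous-depth schedules
-- instead of calling itertools.product afresh per depth; same order, same 50000 cap (objective: alternative).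

-- ===== PORT A =====
-- itertools.product is iterated lazily (as Python's iterator) via nested recursion, and the
-- schedules list is kept reversed with its length as a counter (Python's O(1) append/len),
-- reversed once at the end; loop structure, emission order and the >=50000 early return are A's.
mutual
-- one combo position: depth d positions still to choose, pre = combo prefix chosen so far;
-- at depth 0 the combo is complete: 'schedules.append(list(combo)); if len >= 50000: return'
def prodEmit (agents : List Int) : Nat → List Int → List (List Int) → Nat →
    (List (List Int) × Nat) ⊕ (List (List Int))
  | 0, pre, acc, n =>
    let acc' := pre :: acc
    let n' := n + 1
    if 50000 ≤ n' then Sum.inr acc' else Sum.inl (acc', n')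
  | d+1, pre, acc, n => prodEmitOver agents agents d pre acc n
termination_by d _ _ _ => (d, 0)
-- the choices for the current combo position
def prodEmitOver (agents : List Int) : List Int → Nat → List Int → List (List Int) → Nat →
    (List (List Int) × Nat) ⊕ (List (List Int))
  | [], _, _, acc, n => Sum.inl (acc, n)
  | a :: rest, d, pre, acc, n =>
    match prodEmit agents d (pre ++ [a]) acc n with
    | Sum.inr done => Sum.inr done
    | Sum.inl (acc', n') => prodEmitOver agents rest d pre acc' n'
termination_by l d _ _ _ => (d, l.length + 1)
end

-- 'for depth in range(1, capped_depth + 1)'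
def depthLoopA (agents : List Int) : List Int → List (List Int) → Nat → List (List Int)
  | [], acc, _ => acc
  | d :: rest, acc, n =>
    match prodEmit agents d.toNat [] acc n with
    | Sum.inr done => done
    | Sum.inl (acc', n') => depthLoopA agents rest acc' n'

def enumerate_all_schedules_py (groups : List (List Int)) (max_depth : Int) : List (List Int) :=
  let all_agents := PySem.List.sorted (PySem.Set.ofList (groups.flatMap (fun g => g))) (fun x => x) false
  (depthLoopA all_agents (PySem.List.pyRange 1 (min max_depth 5 + 1) 1) [] 0).reverse

-- ===== PORT B =====
-- out and next_frontier are kept reversed with out's length as a counter (Python's O(1)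
-- append/len); out is reversed at the end and next_frontier once per depth.
-- 'for a in agents: sched = prefix + [a]; out.append(sched); cap check; next_frontier.append(sched)'
def extendPrefix (pre : List Int) : List Int → List (List Int) → Nat → List (List Int) →
    (List (List Int)) ⊕ (List (List Int) × Nat × List (List Int))
  | [], out, n, nf => Sum.inr (out, n, nf)
  | a :: rest, out, n, nf =>
    let sched := pre ++ [a]
    let out' := sched :: out
    let n' := n + 1
    if 50000 ≤ n' then Sum.inl out' else extendPrefix pre rest out' n' (sched :: nf)

-- 'for prefix in frontier: …'
def levelLoop (agents : List Int) : List (List Int) → List (List Int) → Nat → List (List Int) →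
    (List (List Int)) ⊕ (List (List Int) × Nat × List (List Int))
  | [], out, n, nf => Sum.inr (out, n, nf)
  | pre :: rest, out, n, nf =>
    match extendPrefix pre agents out n nf with
    | Sum.inl done => Sum.inl done
    | Sum.inr (out', n', nf') => levelLoop agents rest out' n' nf'

-- 'for _ in range(min(max_depth, 5)): …'
def depthLoopB (agents : List Int) : Nat → List (List Int) → List (List Int) → Nat → List (List Int)
  | 0, _, out, _ => out
  | k+1, frontier, out, n =>
    match levelLoop agents frontier out n [] with
    | Sum.inl done => done
    | Sum.inr (out', n', nf) => depthLoopB agents k nf.reverse out' n'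

def enumerate_all_schedules_py_alt (groups : List (List Int)) (max_depth : Int) : List (List Int) :=
  let agents := PySem.List.sorted (PySem.Set.ofList (groups.flatMap (fun g => g))) (fun x => x) false
  (depthLoopB agents (min max_depth 5).toNat [[]] [] 0).reverse

-- ===== PRECONDITION & SPEC =====
def Spec_enumerate_all_schedules_py (groups : List (List Int)) (max_depth : Int) (out : List (List Int)) : Prop := out = enumerate_all_schedules_py_alt groups max_depth
instance (groups : List (List Int)) (max_depth : Int) (out : List (List Int)) : Decidable (Spec_enumerate_all_schedules_py groups max_depth out) := by unfold Spec_enumerate_all_schedules_py; infer_instance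

-- ===== CLAIM (what is proved, stated in full; the proofs are below) =====
def Claim_equal_enumerate_all_schedules_py : Prop := ∀ (groups : List (List Int)) (max_depth : Int), Dom_enumerate_all_schedules_py groups max_depth → Spec_enumerate_all_schedules_py groups max_depth (enumerate_all_schedules_py groups max_depth)

-- ===== LEMMAS AND PROOFS =====

-- itertools.product(agents, repeat=n) as a value, head position varying slowest
def pyProduct (agents : List Int) : Nat → List (List Int)
  | 0 => [[]]
  | n+1 => agents.flatMap (fun a => (pyProduct agents n).map (fun r => a :: r))

-- what prodEmit agents d pre emits
def emsP (agents : List Int) (d : Nat) (pre : List Int) : List (List Int) :=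
  (pyProduct agents d).map (fun r => pre ++ r)

-- one level: every frontier prefix extended by every agent
def ext (agents : List Int) (F : List (List Int)) : List (List Int) :=
  F.flatMap (fun p => agents.map (fun a => p ++ [a]))

-- the full (uncapped) emission stream of B starting from frontier F, k more levels
def stream (agents : List Int) : List (List Int) → Nat → List (List Int)
  | _, 0 => []
  | F, k+1 => ext agents F ++ stream agents (ext agents F) k

-- concatenation of products of depths j+1 … j+n
def catProd (agents : List Int) : Nat → Nat → List (List Int)
  | _, 0 => []
  | j, n+1 => pyProduct agents (j+1) ++ catProd agents (j+1) n

lemma take_absorb {α : Type} (x y : List α) (h : 50000 ≤ x.length) :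
    (x ++ y).take 50000 = x.take 50000 := List.take_append_of_le_length h

lemma flatMap_flatMap' {α β γ : Type} (l : List α) (f : α → List β) (g : β → List γ) :
    (l.flatMap f).flatMap g = l.flatMap (fun x => (f x).flatMap g) := by
  induction l with
  | nil => rfl
  | cons x t ih => simp [List.flatMap_cons, List.flatMap_append, ih]

lemma prodEmit_eq (agents : List Int) : ∀ (d : Nat) (pre : List Int) (acc : List (List Int)),
    acc.length < 50000 →
    prodEmit agents d pre acc acc.length =
      if 50000 ≤ acc.length + (emsP agents d pre).length
      then Sum.inr (((acc.reverse ++ emsP agents d pre).take 50000).reverse)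
      else Sum.inl ((emsP agents d pre).reverse ++ acc,
        ((emsP agents d pre).reverse ++ acc).length) := by
  intro d
  induction d with
  | zero =>
    intro pre acc hacc
    have h0 : emsP agents 0 pre = [pre] := by simp [emsP, pyProduct]
    rw [prodEmit, h0]
    show (if 50000 ≤ acc.length + 1 then Sum.inr (pre :: acc)
      else Sum.inl (pre :: acc, acc.length + 1)) = _
    by_cases h1 : 50000 ≤ acc.length + 1
    · rw [if_pos h1, if_pos (by simp; omega)]
      rw [List.take_of_length_le (by simp; omega)]
      simp
    · rw [if_neg h1, if_neg (by simp; omega)]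
      simp
  | succ d ihd =>
    have hover : ∀ (l : List Int) (pre : List Int) (acc : List (List Int)),
        acc.length < 50000 →
        prodEmitOver agents l d pre acc acc.length =
          if 50000 ≤ acc.length + (l.flatMap (fun a => emsP agents d (pre ++ [a]))).length
          then Sum.inr (((acc.reverse ++ l.flatMap (fun a => emsP agents d (pre ++ [a]))).take 50000).reverse)
          else Sum.inl ((l.flatMap (fun a => emsP agents d (pre ++ [a]))).reverse ++ acc,
            ((l.flatMap (fun a => emsP agents d (pre ++ [a]))).reverse ++ acc).length) := by
      intro l
      induction l with
      | nil =>
        intro pre acc hacc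
        rw [prodEmitOver, if_neg (by simp; omega)]
        simp
      | cons a rest ihl =>
        intro pre acc hacc
        rw [prodEmitOver, ihd (pre ++ [a]) acc hacc, List.flatMap_cons]
        by_cases h1 : 50000 ≤ acc.length + (emsP agents d (pre ++ [a])).length
        · rw [if_pos h1]
          show Sum.inr (((acc.reverse ++ emsP agents d (pre ++ [a])).take 50000).reverse) = _
          rw [if_pos (by simp; omega)]
          rw [show (acc.reverse ++ (emsP agents d (pre ++ [a]) ++
                rest.flatMap (fun a => emsP agents d (pre ++ [a])))).take 50000
              = (acc.reverse ++ emsP agents d (pre ++ [a])).take 50000 from by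
            rw [← List.append_assoc]; exact take_absorb _ _ (by simp; omega)]
        · rw [if_neg h1]
          show prodEmitOver agents rest d pre
              ((emsP agents d (pre ++ [a])).reverse ++ acc)
              ((emsP agents d (pre ++ [a])).reverse ++ acc).length = _
          rw [ihl pre ((emsP agents d (pre ++ [a])).reverse ++ acc) (by simp; omega)]
          by_cases h2 : 50000 ≤ acc.length + (emsP agents d (pre ++ [a])).length
              + (rest.flatMap (fun a => emsP agents d (pre ++ [a]))).length
          · rw [if_pos (by simp only [List.length_append, List.length_reverse]; omega),
                if_pos (by simp only [List.length_append]; omega)]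
            simp [List.reverse_append, List.append_assoc]
          · rw [if_neg (by simp only [List.length_append, List.length_reverse]; omega),
                if_neg (by simp only [List.length_append]; omega)]
            simp [List.reverse_append, List.append_assoc]
    intro pre acc hacc
    rw [prodEmit, hover agents pre acc hacc]
    have hE : agents.flatMap (fun a => emsP agents d (pre ++ [a])) = emsP agents (d+1) pre := by
      simp [emsP, pyProduct, List.map_flatMap, List.map_map, Function.comp_def,
        List.append_assoc]
    rw [hE]

lemma depthLoopA_eq (agents : List Int) : ∀ (depths : List Int) (acc : List (List Int)),
    acc.length < 50000 →
    depthLoopA agents depths acc acc.length =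
      ((acc.reverse ++ depths.flatMap (fun d => pyProduct agents d.toNat)).take 50000).reverse := by
  intro depths
  induction depths with
  | nil =>
    intro acc h
    rw [depthLoopA, List.flatMap_nil, List.append_nil,
      List.take_of_length_le (by simp; omega), List.reverse_reverse]
  | cons d rest ih =>
    intro acc h
    rw [depthLoopA, prodEmit_eq agents d.toNat [] acc h]
    have h0 : emsP agents d.toNat [] = pyProduct agents d.toNat := by
      simp [emsP]
    rw [h0, List.flatMap_cons]
    by_cases h1 : 50000 ≤ acc.length + (pyProduct agents d.toNat).length
    · rw [if_pos h1]
      show ((acc.reverse ++ pyProduct agents d.toNat).take 50000).reverse = _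
      rw [show (acc.reverse ++ (pyProduct agents d.toNat ++
            rest.flatMap (fun d => pyProduct agents d.toNat))).take 50000
          = (acc.reverse ++ pyProduct agents d.toNat).take 50000 from by
        rw [← List.append_assoc]; exact take_absorb _ _ (by simp; omega)]
    · rw [if_neg h1]
      show depthLoopA agents rest ((pyProduct agents d.toNat).reverse ++ acc)
          ((pyProduct agents d.toNat).reverse ++ acc).length = _
      rw [ih _ (by simp; omega)]
      simp [List.reverse_append, List.append_assoc]

lemma extendPrefix_eq (pre : List Int) : ∀ (ags : List Int) (out nf : List (List Int)),
    out.length < 50000 →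
    extendPrefix pre ags out out.length nf =
      if 50000 ≤ out.length + ags.length
      then Sum.inl (((out.reverse ++ ags.map (fun a => pre ++ [a])).take 50000).reverse)
      else Sum.inr ((ags.map (fun a => pre ++ [a])).reverse ++ out,
        ((ags.map (fun a => pre ++ [a])).reverse ++ out).length,
        (ags.map (fun a => pre ++ [a])).reverse ++ nf) := by
  intro ags
  induction ags with
  | nil =>
    intro out nf h
    rw [extendPrefix, if_neg (by simp; omega)]
    simp
  | cons a rest ih =>
    intro out nf h
    rw [extendPrefix]
    show (if 50000 ≤ out.length + 1 then Sum.inl ((pre ++ [a]) :: out)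
      else extendPrefix pre rest ((pre ++ [a]) :: out) (out.length + 1) ((pre ++ [a]) :: nf)) = _
    rw [List.map_cons]
    by_cases h1 : 50000 ≤ out.length + 1
    · rw [if_pos h1, if_pos (by simp; omega)]
      have ht : (out.reverse ++ (pre ++ [a]) :: rest.map (fun a => pre ++ [a])).take 50000
          = out.reverse ++ [pre ++ [a]] := by
        rw [List.take_append, List.take_of_length_le (by simp; omega)]
        congr 1
        rw [show 50000 - out.reverse.length = 1 from by simp; omega]
        simp
      rw [ht]
      simp
    · rw [if_neg h1]
      have h2 := ih ((pre ++ [a]) :: out) ((pre ++ [a]) :: nf) (by simp; omega)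
      simp only [List.length_cons] at h2
      rw [h2]
      by_cases h3 : 50000 ≤ out.length + (rest.length + 1)
      · rw [if_pos (by omega), if_pos (by simp; omega)]
        simp [List.reverse_cons, List.append_assoc]
      · rw [if_neg (by omega), if_neg (by simp; omega)]
        simp [List.reverse_cons, List.append_assoc]

lemma levelLoop_eq (agents : List Int) : ∀ (F out nf : List (List Int)),
    out.length < 50000 →
    levelLoop agents F out out.length nf =
      if 50000 ≤ out.length + (ext agents F).length
      then Sum.inl (((out.reverse ++ ext agents F).take 50000).reverse)
      else Sum.inr ((ext agents F).reverse ++ out, ((ext agents F).reverse ++ out).length,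
        (ext agents F).reverse ++ nf) := by
  intro F
  induction F with
  | nil =>
    intro out nf h
    rw [levelLoop, if_neg (by simp [ext]; omega)]
    simp [ext]
  | cons p rest ih =>
    intro out nf h
    rw [levelLoop, extendPrefix_eq p agents out nf h]
    have hext : ext agents (p :: rest) = (agents.map fun a => p ++ [a]) ++ ext agents rest := by
      simp [ext]
    rw [hext]
    by_cases h1 : 50000 ≤ out.length + agents.length
    · rw [if_pos h1]
      show Sum.inl (((out.reverse ++ agents.map fun a => p ++ [a]).take 50000).reverse) = _
      rw [if_pos (by simp; omega)]
      rw [show (out.reverse ++ ((agents.map fun a => p ++ [a]) ++ ext agents rest)).take 50000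
          = (out.reverse ++ agents.map fun a => p ++ [a]).take 50000 from by
        rw [← List.append_assoc]; exact take_absorb _ _ (by simp; omega)]
    · rw [if_neg h1]
      show levelLoop agents rest ((agents.map fun a => p ++ [a]).reverse ++ out)
          ((agents.map fun a => p ++ [a]).reverse ++ out).length
          ((agents.map fun a => p ++ [a]).reverse ++ nf) = _
      rw [ih _ _ (by simp; omega)]
      by_cases h2 : 50000 ≤ out.length + agents.length + (ext agents rest).length
      · rw [if_pos (by simp; omega), if_pos (by simp; omega)]
        simp [List.reverse_append, List.append_assoc]
      · rw [if_neg (by simp; omega), if_neg (by simp; omega)]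
        simp [List.reverse_append, List.append_assoc]

lemma depthLoopB_eq (agents : List Int) : ∀ (k : Nat) (F out : List (List Int)),
    out.length < 50000 →
    depthLoopB agents k F out out.length = ((out.reverse ++ stream agents F k).take 50000).reverse := by
  intro k
  induction k with
  | zero =>
    intro F out h
    rw [depthLoopB]
    rw [show stream agents F 0 = [] from rfl, List.append_nil,
      List.take_of_length_le (by simp; omega), List.reverse_reverse]
  | succ k ih =>
    intro F out h
    rw [depthLoopB, levelLoop_eq agents F out [] h,
      show stream agents F (k+1) = ext agents F ++ stream agents (ext agents F) k from rfl]
    by_cases h1 : 50000 ≤ out.length + (ext agents F).length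
    · rw [if_pos h1]
      show ((out.reverse ++ ext agents F).take 50000).reverse = _
      rw [show (out.reverse ++ (ext agents F ++ stream agents (ext agents F) k)).take 50000
          = (out.reverse ++ ext agents F).take 50000 from by
        rw [← List.append_assoc]; exact take_absorb _ _ (by simp; omega)]
    · rw [if_neg h1]
      show depthLoopB agents k ((ext agents F).reverse ++ []).reverse
          ((ext agents F).reverse ++ out) ((ext agents F).reverse ++ out).length = _
      rw [List.append_nil, List.reverse_reverse,
        ih (ext agents F) ((ext agents F).reverse ++ out) (by simp; omega)]
      simp [List.reverse_append, List.append_assoc]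

lemma flatMap_single {α β : Type} (f : α → β) : ∀ l : List α,
    l.flatMap (fun a => [f a]) = l.map f
  | [] => rfl
  | a :: t => by rw [List.flatMap_cons, flatMap_single f t]; rfl

lemma pyProduct_snoc (agents : List Int) : ∀ n : Nat,
    pyProduct agents (n+1) = ext agents (pyProduct agents n) := by
  intro n
  induction n with
  | zero =>
    show agents.flatMap (fun a => ([[]] : List (List Int)).map fun r => a :: r) = ext agents [[]]
    simp only [List.map_cons, List.map_nil, ext, List.flatMap_cons, List.flatMap_nil,
      List.append_nil, List.nil_append]
    exact flatMap_single (fun a => [a]) agents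
  | succ n ih =>
    conv_lhs => rw [pyProduct, ih]
    conv_rhs => rw [pyProduct]
    simp only [ext, List.map_flatMap]
    rw [flatMap_flatMap']
    simp [List.flatMap_map, List.map_map, Function.comp_def, List.cons_append]

lemma stream_pyProduct (agents : List Int) : ∀ (k j : Nat),
    stream agents (pyProduct agents j) k = catProd agents j k := by
  intro k
  induction k with
  | zero => intro j; simp [stream, catProd]
  | succ k ih =>
    intro j
    rw [stream, ← pyProduct_snoc, catProd, ih (j+1)]

lemma catProd_succ_right (agents : List Int) : ∀ (n j : Nat),
    catProd agents j (n+1) = catProd agents j n ++ pyProduct agents (j+n+1) := by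
  intro n
  induction n with
  | zero => intro j; simp [catProd]
  | succ n ih =>
    intro j
    rw [catProd, ih (j+1), catProd, List.append_assoc]
    have h : j + 1 + n + 1 = j + (n+1) + 1 := by omega
    rw [h]

lemma pyRangeNat_flatMap (agents : List Int) : ∀ n : Nat,
    (PySem.List.pyRange 1 ((n : Int) + 1) 1).flatMap (fun d => pyProduct agents d.toNat)
      = catProd agents 0 n := by
  intro n
  induction n with
  | zero =>
    rw [PySem.List.pyRange_one_eq_nil (by omega)]
    rfl
  | succ n ih =>
    push_cast
    rw [PySem.List.pyRange_one_succ_right (by omega : (1 : Int) ≤ (n : Int) + 1),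
      List.flatMap_append, ih]
    simp only [List.flatMap_cons, List.flatMap_nil, List.append_nil]
    have h1 : ((n : Int) + 1).toNat = n + 1 := by omega
    rw [h1, catProd_succ_right]
    simp

lemma pyRange_flatMap (agents : List Int) (c : Int) :
    (PySem.List.pyRange 1 (c + 1) 1).flatMap (fun d => pyProduct agents d.toNat)
      = catProd agents 0 c.toNat := by
  by_cases hc : 0 ≤ c
  · obtain ⟨m, rfl⟩ : ∃ m : Nat, c = (m : Int) := ⟨c.toNat, by omega⟩
    simp only [Int.toNat_natCast]
    exact pyRangeNat_flatMap agents m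
  · rw [PySem.List.pyRange_one_eq_nil (by omega)]
    have h : c.toNat = 0 := by omega
    rw [h]
    rfl

-- ===== VERDICT (by name: the statement is the Claim_ definition above) =====
theorem enumerate_all_schedules_py_spec : Claim_equal_enumerate_all_schedules_py := by
  intro groups max_depth _
  unfold Spec_enumerate_all_schedules_py enumerate_all_schedules_py enumerate_all_schedules_py_alt
  simp only
  rw [show (0 : Nat) = ([] : List (List Int)).length from rfl,
    depthLoopA_eq _ _ [] (by simp), depthLoopB_eq _ _ [[]] [] (by simp),
    List.reverse_nil, List.nil_append, List.nil_append,
    List.reverse_reverse, List.reverse_reverse]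
  rw [show ([[]] : List (List Int)) = pyProduct
      (PySem.List.sorted (PySem.Set.ofList (groups.flatMap (fun g => g))) (fun x => x) false) 0
    from rfl, stream_pyProduct, pyRange_flatMap]
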